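-- pv_equiv track=rewrite | github.com/ZesRamal/Practicas-Backend-II | Algoritmo-Ordenamiento-Romano/algoritmo.py | obtener_numero_palabras
-- ===== SOURCE A (Python) =====
-- numeros_romanos = {"i":1,"v":5,"x":10,"l":50,"c":100,"d":500,"m":1000}
--
-- def calcular_valor(palabra, indice, valor_anadido, contador):
--     """
--     Calcula el valor numérico de una cadena de caracteres romanos dentro de la palabra.
--
--     Args:
--         palabra (str): La cadena a evaluar.
--         indice (int): El índice actual en la cadena.
--         valor_anadido (int): El valor acumulado hasta el momento.
--         contador (int): Contador para controlar la repetición de símbolos.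
--
--     Returns:
--         int: El valor numérico de la cadena de caracteres romanos.
--     """
--     if indice < len(palabra) and palabra[indice] in numeros_romanos:
--         letra = palabra[indice]
--         valor_letra = numeros_romanos[letra]
--         letra_anterior = palabra[indice - 1]
--         if indice > 0 and letra_anterior in numeros_romanos:
--             valor_letra_anterior = numeros_romanos[letra_anterior]
--             if letra in "ixcm" and contador != 2:
--                 if valor_letra > valor_letra_anterior and letra_anterior in "ixc" :
--                     valor_anadido += valor_letra - valor_letra_anterior * 2
--                 elif letra_anterior in "vld" and contador >= 1:
--                     return valor_anadido
--                 else: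
--                     valor_anadido += valor_letra
--                 if letra_anterior == letra:
--                     contador += 1
--                 else:
--                     contador = 0
--             elif letra in "vld" and letra_anterior != letra:
--                 if letra_anterior in "ixc" and contador <= 1 and valor_letra > valor_letra_anterior:
--                     valor_anadido += valor_letra - valor_letra_anterior * 2
--                     contador += 1
--                 elif valor_letra_anterior > valor_letra:
--                     valor_anadido += valor_letra
--         else:
--             valor_anadido += valor_letra
--         valor_anadido = calcular_valor(palabra,indice + 1, valor_anadido, contador)
--     return valor_anadido
--
-- def posicion_primer_numero_romano(palabra):
--     """
--     Encuentra la posición del primer carácter romano en una cadena.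
--
--     Args:
--         palabra (str): La cadena a buscar.
--
--     Returns:
--         int: La posición del primer carácter romano, o None si no se encuentra.
--     """
--     for i, letra in enumerate(palabra):
--         if letra in numeros_romanos:
--             return i
--     return 0
--
-- def obtener_numero_palabras(lista_palabras):
--     """
--     Obtiene el valor numérico romano de cada palabra en una lista.
--
--     Args:
--         lista_palabras (list): Una lista de palabras.
--
--     Returns:
--         dict: Diccionario {palabra : valor numérico romano}
--     """
--     diccionario_palabras_romano = {}
--     for palabra in lista_palabras:
--         palabra_minuscula = palabra.lower()
--         indice = posicion_primer_numero_romano(palabra_minuscula)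
--         valor_romano = calcular_valor(palabra_minuscula, indice, 0, 0)
--         diccionario_palabras_romano[palabra] = valor_romano
--     return diccionario_palabras_romano
-- ===== SOURCE B (Python) =====
-- numeros_romanos = {"i": 1, "v": 5, "x": 10, "l": 50, "c": 100, "d": 500, "m": 1000}
--
-- def obtener_numero_palabras(lista_palabras):
--     resultado = {}
--     for palabra in lista_palabras:
--         pm = palabra.lower()
--         inicio = next((i for i, ch in enumerate(pm) if ch in numeros_romanos), 0)
--         valor = 0
--         contador = 0
--         for i in range(inicio, len(pm)):
--             letra = pm[i]
--             if letra not in numeros_romanos: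
--                 break
--             v = numeros_romanos[letra]
--             if i > 0 and pm[i - 1] in numeros_romanos:
--                 ant = pm[i - 1]
--                 va = numeros_romanos[ant]
--                 if letra in "ixcm" and contador != 2:
--                     if v > va and ant in "ixc":
--                         valor += v - 2 * va
--                     elif ant in "vld" and contador >= 1:
--                         break
--                     else:
--                         valor += v
--                     contador = contador + 1 if ant == letra else 0
--                 elif letra in "vld" and ant != letra:
--                     if ant in "ixc" and contador <= 1 and v > va:
--                         valor += v - 2 * va
--                         contador += 1
--                     elif va > v:
--                         valor += v
--             else:
--                 valor += v
--         resultado[palabra] = valor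
--     return resultado
-- ===== Notes on version B (the rewrite author's own statement) =====
-- stated objective: simpler
-- what changed: The tail-recursive calcular_valor (accumulator-passing recursion with an early return) is replaced by a single iterative for-loop over the character indices with break, and the first-Roman-letter search becomes an idiomatic next()/findIdx? lookup instead of a hand-written scan.
import Mathlib
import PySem

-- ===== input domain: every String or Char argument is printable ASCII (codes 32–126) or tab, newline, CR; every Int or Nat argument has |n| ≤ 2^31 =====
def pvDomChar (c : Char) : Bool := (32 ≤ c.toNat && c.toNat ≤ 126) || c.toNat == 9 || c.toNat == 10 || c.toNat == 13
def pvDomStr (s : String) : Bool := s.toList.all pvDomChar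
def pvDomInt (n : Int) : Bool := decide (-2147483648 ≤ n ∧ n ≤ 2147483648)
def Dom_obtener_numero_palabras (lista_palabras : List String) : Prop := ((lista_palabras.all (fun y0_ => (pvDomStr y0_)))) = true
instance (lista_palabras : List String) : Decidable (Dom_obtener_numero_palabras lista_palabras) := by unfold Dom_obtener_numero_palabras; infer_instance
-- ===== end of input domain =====

-- B replaces the tail-recursive calcular_valor by a single iterative for-loop over the
-- character indices (with break), and finds the first Roman letter with findIdx?; objective: simpler.


-- ===== PORT A =====
-- numeros_romanos as a lookup function; (nr c).isSome = "c in numeros_romanos"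
def nr (c : Char) : Option Int :=
  if c = 'i' then some 1 else if c = 'v' then some 5 else if c = 'x' then some 10
  else if c = 'l' then some 50 else if c = 'c' then some 100 else if c = 'd' then some 500
  else if c = 'm' then some 1000 else none

-- the early 'return valor_anadido' is carried as the Bool in the triple (value, contador, early)
def calcular_valor (palabra : List Char) (indice valor_anadido contador : Int) : Int :=
  if h : indice < (palabra.length : Int) ∧ ((PySem.List.pyGet? palabra indice).bind nr).isSome then
    let letra := (PySem.List.pyGet? palabra indice).getD ' '
    let valor_letra := (nr letra).getD 0
    let letra_anterior := (PySem.List.pyGet? palabra (indice - 1)).getD ' '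
    let st : Int × Int × Bool :=
      if indice > 0 ∧ (nr letra_anterior).isSome then
        let valor_letra_anterior := (nr letra_anterior).getD 0
        if "ixcm".toList.contains letra ∧ contador ≠ 2 then
          if valor_letra > valor_letra_anterior ∧ "ixc".toList.contains letra_anterior then
            (valor_anadido + (valor_letra - valor_letra_anterior * 2),
             if letra_anterior = letra then contador + 1 else 0, false)
          else if "vld".toList.contains letra_anterior ∧ contador ≥ 1 then
            (valor_anadido, contador, true)
          else
            (valor_anadido + valor_letra,
             if letra_anterior = letra then contador + 1 else 0, false)
        else if "vld".toList.contains letra ∧ letra_anterior ≠ letra then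
          if "ixc".toList.contains letra_anterior ∧ contador ≤ 1 ∧ valor_letra > valor_letra_anterior then
            (valor_anadido + (valor_letra - valor_letra_anterior * 2), contador + 1, false)
          else if valor_letra_anterior > valor_letra then
            (valor_anadido + valor_letra, contador, false)
          else (valor_anadido, contador, false)
        else (valor_anadido, contador, false)
      else (valor_anadido + valor_letra, contador, false)
    if st.2.2 then st.1
    else calcular_valor palabra (indice + 1) st.1 st.2.1
  else valor_anadido
termination_by ((palabra.length : Int) - indice).toNat
decreasing_by
  omega

def posicion_aux (i : Int) : List Char → Int
  | [] => 0
  | c :: cs => if (nr c).isSome then i else posicion_aux (i + 1) cs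

def posicion_primer_numero_romano (palabra : List Char) : Int :=
  posicion_aux 0 palabra

def obtener_numero_palabras (lista_palabras : List String) : List (String × Int) :=
  (lista_palabras.foldl (fun d palabra =>
    let pm := (PySem.Str.lower palabra).toList
    let indice := posicion_primer_numero_romano pm
    PySem.Dict.insert d palabra (calcular_valor pm indice 0 0)) PySem.Dict.empty).items

-- ===== PORT B =====
-- the for-loop over range(inicio, len(pm)); returning the accumulator realises 'break'
def loopB (palabra : List Char) : List Int → Int → Int → Int
  | [], valor, _ => valor
  | i :: rest, valor, contador =>
    match (PySem.List.pyGet? palabra i).bind nr with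
    | none => valor  -- letra not in numeros_romanos: break (pyGet? is never none on the reached inputs)
    | some v =>
      let letra := (PySem.List.pyGet? palabra i).getD ' '
      if i > 0 ∧ (nr ((PySem.List.pyGet? palabra (i - 1)).getD ' ')).isSome then
        let ant := (PySem.List.pyGet? palabra (i - 1)).getD ' '
        let va := (nr ant).getD 0
        if "ixcm".toList.contains letra ∧ contador ≠ 2 then
          if v > va ∧ "ixc".toList.contains ant then
            loopB palabra rest (valor + (v - 2 * va)) (if ant = letra then contador + 1 else 0)
          else if "vld".toList.contains ant ∧ contador ≥ 1 then valor  -- break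
          else loopB palabra rest (valor + v) (if ant = letra then contador + 1 else 0)
        else if "vld".toList.contains letra ∧ ant ≠ letra then
          if "ixc".toList.contains ant ∧ contador ≤ 1 ∧ v > va then
            loopB palabra rest (valor + (v - 2 * va)) (contador + 1)
          else if va > v then loopB palabra rest (valor + v) contador
          else loopB palabra rest valor contador
        else loopB palabra rest valor contador
      else loopB palabra rest (valor + v) contador

def obtener_numero_palabras_alt (lista_palabras : List String) : List (String × Int) :=
  (lista_palabras.foldl (fun d palabra =>
    let pm := (PySem.Str.lower palabra).toList
    let inicio : Int := ((pm.findIdx? (fun c => (nr c).isSome)).map (Int.ofNat)).getD 0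
    PySem.Dict.insert d palabra
      (loopB pm (PySem.List.pyRange inicio (pm.length : Int) 1) 0 0)) PySem.Dict.empty).items

-- ===== PRECONDITION & SPEC =====
def Spec_obtener_numero_palabras (lista_palabras : List String) (out : List (String × Int)) : Prop := out = obtener_numero_palabras_alt lista_palabras
instance (lista_palabras : List String) (out : List (String × Int)) : Decidable (Spec_obtener_numero_palabras lista_palabras out) := by unfold Spec_obtener_numero_palabras; infer_instance

-- ===== CLAIM (what is proved, stated in full; the proofs are below) =====
def Claim_equal_obtener_numero_palabras : Prop := ∀ (lista_palabras : List String), Dom_obtener_numero_palabras lista_palabras → Spec_obtener_numero_palabras lista_palabras (obtener_numero_palabras lista_palabras)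

-- ===== LEMMAS AND PROOFS =====

-- the iterative loop over range(i, len) computes exactly the recursion from index i
theorem loopB_eq_calcular (palabra : List Char) (i valor contador : Int) :
    loopB palabra (PySem.List.pyRange i (palabra.length : Int) 1) valor contador
      = calcular_valor palabra i valor contador := by
  rw [calcular_valor]
  by_cases h : i < (palabra.length : Int) ∧ ((PySem.List.pyGet? palabra i).bind nr).isSome
  · rw [dif_pos h]
    obtain ⟨hlt, hs⟩ := h
    rw [PySem.List.pyRange_one_cons hlt]
    cases hg : PySem.List.pyGet? palabra i with
    | none => simp [hg] at hs
    | some letra =>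
      cases hn : nr letra with
      | none => simp [hg, hn] at hs
      | some v =>
        have IH : ∀ valor contador : Int,
            loopB palabra (PySem.List.pyRange (i + 1) (palabra.length : Int) 1) valor contador
              = calcular_valor palabra (i + 1) valor contador :=
          fun valor contador => loopB_eq_calcular palabra (i + 1) valor contador
        simp only [loopB, hg, hn, Option.bind_some, Option.getD_some]
        split_ifs <;>
          first
            | rfl
            | exact IH _ _
            | (rw [show ∀ x y : Int, x - 2 * y = x - y * 2 from fun x y => by ring]; exact IH _ _)
            | simp_all
  · rw [dif_neg h]
    by_cases hlt : i < (palabra.length : Int)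
    · rw [PySem.List.pyRange_one_cons hlt]
      have hnone : (PySem.List.pyGet? palabra i).bind nr = none := by
        cases hb : (PySem.List.pyGet? palabra i).bind nr with
        | none => rfl
        | some v => exact absurd ⟨hlt, by simp [hb]⟩ h
      simp [loopB, hnone]
    · rw [PySem.List.pyRange_one_eq_nil (by omega)]
      rfl
termination_by ((palabra.length : Int) - i).toNat
decreasing_by omega

-- posicion_aux is findIdx? shifted by the running offset (with fallback 0)
theorem posicion_aux_eq (l : List Char) (j : Int) :
    posicion_aux j l = ((l.findIdx? (fun c => (nr c).isSome)).map (fun k => j + (k : Int))).getD 0 := by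
  induction l generalizing j with
  | nil => simp [posicion_aux]
  | cons c cs ih =>
    by_cases h : (nr c).isSome
    · simp [posicion_aux, h, List.findIdx?_cons]
    · simp only [posicion_aux, if_false, List.findIdx?_cons, h, Bool.false_eq_true, ih (j + 1)]
      cases hf : cs.findIdx? (fun c => (nr c).isSome) <;> simp
      omega

-- ===== VERDICT (by name: the statement is the Claim_ definition above) =====
theorem obtener_numero_palabras_spec : Claim_equal_obtener_numero_palabras := by
  intro lista _
  unfold Spec_obtener_numero_palabras obtener_numero_palabras obtener_numero_palabras_alt
  congr 2
  funext d palabra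
  simp only []
  rw [loopB_eq_calcular]
  congr 1
  unfold posicion_primer_numero_romano
  rw [posicion_aux_eq]
  cases hf : ((PySem.Str.lower palabra).toList).findIdx? (fun c => (nr c).isSome) <;> simp
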